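-- pv_equiv track=rewrite | github.com/edoriggio/algorithms-and-data-structures | exercises/sheet/#124.py | top_three_friends_of_friends
-- ===== SOURCE A (Python) =====
-- def top_three_friends_of_friends(user):
--     memo = {}
--     top_three = []
--
--     for i in user:
--         for j in user[i]:
--             if j not in memo:
--                 memo[j] = 1
--             else:
--                 memo[j] += 1
--
--     for _ in range(3):
--         current_maximum = (0,0)
--
--         for i in memo:
--             if memo[i] > current_maximum[1]:
--                 current_maximum = (i, memo[i])
--
--         top_three.append(current_maximum[0])
--         memo[current_maximum[0]] = -1
--
--     return top_three
-- ===== SOURCE B (Python) =====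
-- def top_three_friends_of_friends(user):
--     counts = {}
--     for friends in user.values():
--         for f in friends:
--             counts[f] = counts.get(f, 0) + 1
--     ranked = sorted(counts, key=lambda k: counts[k], reverse=True)
--     return ranked[:3]
-- ===== Notes on version B (the rewrite author's own statement) =====
-- stated objective: idiomatic
-- what changed: Phase two replaced: instead of three destructive max-scan passes over the dict (marking picked keys with -1), B sorts the keys once by descending count (stable sort preserves insertion order on ties, matching A's first-in-iteration tie-break) and takes the first three.
-- outside the precondition, e.g. on top_three_friends_of_friends({'a': ['x']}): A returns ['x', 0, 0], B returns ['x']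
import Mathlib
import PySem

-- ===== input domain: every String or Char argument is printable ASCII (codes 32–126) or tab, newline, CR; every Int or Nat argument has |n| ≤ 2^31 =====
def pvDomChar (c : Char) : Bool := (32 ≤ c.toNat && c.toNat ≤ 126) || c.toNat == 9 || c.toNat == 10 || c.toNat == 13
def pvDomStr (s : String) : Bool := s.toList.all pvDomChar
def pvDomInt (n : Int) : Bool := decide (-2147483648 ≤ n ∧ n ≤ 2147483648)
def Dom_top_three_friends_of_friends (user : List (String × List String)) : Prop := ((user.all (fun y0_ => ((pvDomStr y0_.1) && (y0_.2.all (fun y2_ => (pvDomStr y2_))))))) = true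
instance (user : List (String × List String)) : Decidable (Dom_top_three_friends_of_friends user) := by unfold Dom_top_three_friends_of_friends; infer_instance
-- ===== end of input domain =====

-- B replaces A's three destructive max-scan passes by one stable descending sort of the counter's keys (same results incl. ties); objective: idiomatic.


-- ===== PORT A =====
-- inner scan of one `for _ in range(3)` round: `for i in memo: if memo[i] > current_maximum[1]: …`
def pvPickMax (memo : PySem.Dict String Int) : Option String × Int :=
  memo.items.foldl (fun cm p => if cm.2 < p.2 then (some p.1, p.2) else cm)
    ((none : Option String), (0 : Int))

-- body of `for _ in range(3)`: append the argmax and mark it with -1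
def pvRoundStep (st : PySem.Dict String Int × List String) (_ : Int) :
    PySem.Dict String Int × List String :=
  let cm := pvPickMax st.1
  match cm.1 with
  | some k => (st.1.insert k (-1), st.2 ++ [k])
  | none   => (st.1, st.2)  -- Python appends the int 0 here (not a str): excluded by Pre_

def top_three_friends_of_friends (user : List (String × List String)) : List String :=
  let userD : PySem.Dict String (List String) := PySem.Dict.ofList user
  let memo : PySem.Dict String Int :=
    userD.keys.foldl (fun memo i =>
      (userD.getD i []).foldl (fun memo j =>
        if memo.contains j = false then memo.insert j 1
        else memo.insert j (memo.getD j 0 + 1)) memo) PySem.Dict.empty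
  let st := (PySem.List.pyRange 0 3 1).foldl pvRoundStep (memo, [])
  st.2

-- ===== PORT B =====
def top_three_friends_of_friends_alt (user : List (String × List String)) : List String :=
  let userD : PySem.Dict String (List String) := PySem.Dict.ofList user
  let counts : PySem.Dict String Int :=
    userD.values.foldl (fun d friends =>
      friends.foldl (fun (d : PySem.Dict String Int) f => d.insert f (d.getD f 0 + 1)) d)
      PySem.Dict.empty
  let ranked := PySem.List.sorted counts.keys (fun k => counts.getD k 0) true
  PySem.List.slice ranked none (some 3)

-- ===== PRECONDITION & SPEC =====
-- Pre_ excludes inputs whose dict holds fewer than three distinct friends-of-friends: on those A pads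
-- its result with the int 0, which is not a value of the declared return type list[str].
def Pre_top_three_friends_of_friends (user : List (String × List String)) : Prop :=
  3 ≤ (PySem.Set.ofList ((PySem.Dict.ofList user).items.flatMap Prod.snd)).length

instance (user : List (String × List String)) : Decidable (Pre_top_three_friends_of_friends user) := by
  unfold Pre_top_three_friends_of_friends; infer_instance

def pvWitness_top_three_friends_of_friends : (List (String × List String)) := [("a", ["x", "y", "z"])]

def Spec_top_three_friends_of_friends (user : List (String × List String)) (out : List String) : Prop := out = top_three_friends_of_friends_alt user
instance (user : List (String × List String)) (out : List String) : Decidable (Spec_top_three_friends_of_friends user out) := by unfold Spec_top_three_friends_of_friends; infer_instance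

-- ===== CLAIM (what is proved, stated in full; the proofs are below) =====
def Claim_equal_top_three_friends_of_friends : Prop := ∀ (user : List (String × List String)), Dom_top_three_friends_of_friends user → Pre_top_three_friends_of_friends user → Spec_top_three_friends_of_friends user (top_three_friends_of_friends user)

-- ===== LEMMAS AND PROOFS =====

theorem insertBy_cons {α : Type} (before : α → α → Bool) (x y : α) (ys : List α) :
    PySem.List.insertBy before x (y :: ys) =
      if before x y then x :: y :: ys else y :: PySem.List.insertBy before x ys := rfl

theorem sorted_rev_snoc {α : Type} (c : α → Int) (l : List α) (x : α) :
    PySem.List.sorted (l ++ [x]) c true =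
      PySem.List.insertBy (fun a b => decide (c b < c a)) x (PySem.List.sorted l c true) := by
  rw [PySem.List.sorted_rev_eq_foldl_insertBy, PySem.List.sorted_rev_eq_foldl_insertBy,
    List.foldl_append]
  rfl

-- stable reverse sort peels off the FIRST element attaining the maximal key
theorem sorted_rev_head_decomp {α : Type} (c : α → Int) :
    ∀ (xs : List α), xs ≠ [] →
      ∃ as m bs, xs = as ++ m :: bs ∧ (∀ a ∈ as, c a < c m) ∧ (∀ y ∈ xs, c y ≤ c m) ∧
        PySem.List.sorted xs c true = m :: PySem.List.sorted (as ++ bs) c true := by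
  intro xs
  induction xs using List.reverseRecOn with
  | nil => intro h; exact absurd rfl h
  | append_singleton l x ih =>
    intro _
    by_cases hl : l = []
    · subst hl
      exact ⟨[], x, [], rfl, by simp, by simp, rfl⟩
    · obtain ⟨as, m, bs, hdec, has, hall, hs⟩ := ih hl
      by_cases hcx : c m < c x
      · refine ⟨l, x, [], by simp, ?_, ?_, ?_⟩
        · intro a ha
          exact lt_of_le_of_lt (hall a ha) hcx
        · intro y hy
          rcases List.mem_append.1 hy with hy | hy
          · exact le_of_lt (lt_of_le_of_lt (hall y hy) hcx)
          · simp at hy; subst hy; exact le_refl _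
        · rw [sorted_rev_snoc, hs, insertBy_cons]
          simp [hcx, hs]
      · refine ⟨as, m, bs ++ [x], by rw [hdec]; simp, has, ?_, ?_⟩
        · intro y hy
          rcases List.mem_append.1 hy with hy | hy
          · exact hall y hy
          · simp at hy; subst hy; exact le_of_not_gt hcx
        · rw [sorted_rev_snoc, hs, insertBy_cons]
          have : (decide (c m < c x)) = false := by simp [hcx]
          simp only [this]
          rw [← sorted_rev_snoc]
          simp

theorem afold_const (L : List (String × Int)) : ∀ (cm : Option String × Int),
    (∀ p ∈ L, p.2 ≤ cm.2) →
    L.foldl (fun cm p => if cm.2 < p.2 then (some p.1, p.2) else cm) cm = cm := by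
  induction L with
  | nil => intro cm _; rfl
  | cons p t ih =>
    intro cm h
    have hp : ¬ cm.2 < p.2 := not_lt.2 (h p (by simp))
    simp only [List.foldl_cons, if_neg hp]
    exact ih cm (fun q hq => h q (by simp [hq]))

theorem afold_decomp (m : String × Int) (bs : List (String × Int)) (hbs : ∀ y ∈ bs, y.2 ≤ m.2) :
    ∀ (as : List (String × Int)) (cm : Option String × Int), cm.2 < m.2 →
    (∀ a ∈ as, a.2 < m.2) →
    (as ++ m :: bs).foldl (fun cm p => if cm.2 < p.2 then (some p.1, p.2) else cm) cm
      = (some m.1, m.2) := by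
  intro as
  induction as with
  | nil =>
    intro cm hcm _
    simp only [List.nil_append, List.foldl_cons, if_pos hcm]
    exact afold_const bs (some m.1, m.2) hbs
  | cons a t ih =>
    intro cm hcm hat
    simp only [List.cons_append, List.foldl_cons]
    by_cases h : cm.2 < a.2
    · rw [if_pos h]
      exact ih (some a.1, a.2) (hat a (by simp)) (fun q hq => hat q (by simp [hq]))
    · rw [if_neg h]
      exact ih cm hcm (fun q hq => hat q (by simp [hq]))

theorem afold_filter : ∀ (L : List (String × Int)) (cm : Option String × Int), 0 ≤ cm.2 →
    L.foldl (fun cm p => if cm.2 < p.2 then (some p.1, p.2) else cm) cm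
      = (L.filter (fun p => decide (0 < p.2))).foldl
          (fun cm p => if cm.2 < p.2 then (some p.1, p.2) else cm) cm := by
  intro L
  induction L with
  | nil => intro cm _; rfl
  | cons p t ih =>
    intro cm hcm
    by_cases hp : 0 < p.2
    · have : (fun p : String × Int => decide (0 < p.2)) p = true := by simpa using hp
      rw [show List.filter (fun p : String × Int => decide (0 < p.2)) (p :: t)
            = p :: List.filter (fun p : String × Int => decide (0 < p.2)) t from
          List.filter_cons_of_pos this, List.foldl_cons, List.foldl_cons]
      by_cases h : cm.2 < p.2
      · simp only [if_pos h]; exact ih _ (le_of_lt hp)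
      · simp only [if_neg h]; exact ih _ hcm
    · have hnot : ¬ cm.2 < p.2 := fun h => hp (lt_of_le_of_lt hcm h)
      have : (fun p : String × Int => decide (0 < p.2)) p = false := by simpa using hp
      rw [show List.filter (fun p : String × Int => decide (0 < p.2)) (p :: t)
            = List.filter (fun p : String × Int => decide (0 < p.2)) t from
          List.filter_cons_of_neg (by simp [this]), List.foldl_cons]
      simp only [if_neg hnot]
      exact ih _ hcm

-- A's max-scan over a dict whose items are K.map (k, w k) picks the first key of the
-- positive-valued part whose value is maximal
theorem round_select (K : List String) (w : String → Int) (as bs : List String) (m : String)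
    (hK : K.filter (fun k => decide (0 < w k)) = as ++ m :: bs)
    (hm : 0 < w m) (has : ∀ a ∈ as, w a < w m) (hbs : ∀ y ∈ bs, w y ≤ w m) :
    (K.map (fun k => (k, w k))).foldl
      (fun cm p => if cm.2 < p.2 then (some p.1, p.2) else cm) ((none : Option String), (0 : Int))
      = (some m, w m) := by
  rw [afold_filter _ _ (by simp), List.filter_map]
  have hcomp : ((fun p : String × Int => decide (0 < p.2)) ∘ (fun k => (k, w k)))
      = fun k => decide (0 < w k) := rfl
  rw [hcomp, hK, List.map_append, List.map_cons]
  exact afold_decomp (m, w m) (bs.map (fun k => (k, w k)))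
    (by intro y hy; obtain ⟨k, hk, rfl⟩ := List.mem_map.1 hy; exact hbs k hk)
    (as.map (fun k => (k, w k))) (none, 0) hm
    (by intro a ha; obtain ⟨k, hk, rfl⟩ := List.mem_map.1 ha; exact has k hk)

theorem inner_step_eq :
    (fun (memo : PySem.Dict String Int) (j : String) =>
      if memo.contains j = false then memo.insert j 1
      else memo.insert j (memo.getD j 0 + 1))
    = fun (memo : PySem.Dict String Int) (j : String) => memo.insert j (memo.getD j 0 + 1) := by
  funext memo j
  by_cases h : memo.contains j = true
  · simp [h]
  · have hf : memo.contains j = false := by simpa using h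
    simp [hf, PySem.Dict.getD_of_not_contains _ _ hf]

theorem memoA_eq (D : PySem.Dict String (List String)) (hnd : D.keys.Nodup) :
    D.keys.foldl (fun memo i =>
      (D.getD i []).foldl (fun memo j =>
        if memo.contains j = false then memo.insert j 1
        else memo.insert j (memo.getD j 0 + 1)) memo) PySem.Dict.empty
    = PySem.Dict.counter (D.items.flatMap Prod.snd) := by
  rw [inner_step_eq]
  have h1 : D.keys = D.items.map Prod.fst := rfl
  rw [h1, List.foldl_map]
  rw [PySem.List.foldl_congr_mem _ _
    (fun memo (p : String × List String) =>
      p.2.foldl (fun (m : PySem.Dict String Int) j => m.insert j (m.getD j 0 + 1)) memo) _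
    (by
      intro acc p hp
      have : D.getD p.1 [] = p.2 :=
        PySem.Dict.getD_of_mem_items D (by simpa using hp) hnd []
      rw [this])]
  rw [← List.foldl_flatMap, PySem.Dict.foldl_insert_getD_add_one_eq_counter]

theorem countsB_eq (D : PySem.Dict String (List String)) :
    D.values.foldl (fun d friends =>
      friends.foldl (fun (d : PySem.Dict String Int) f => d.insert f (d.getD f 0 + 1)) d)
      PySem.Dict.empty
    = PySem.Dict.counter (D.items.flatMap Prod.snd) := by
  have h1 : D.values = D.items.map Prod.snd := rfl
  rw [h1, List.foldl_map, ← List.foldl_flatMap, PySem.Dict.foldl_insert_getD_add_one_eq_counter]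

theorem pvRoundStep_eval (d : PySem.Dict String Int) (acc : List String) (n : Int)
    (m : String) (v : Int) (h : pvPickMax d = (some m, v)) :
    pvRoundStep (d, acc) n = (d.insert m (-1), acc ++ [m]) := by
  unfold pvRoundStep
  rw [h]

-- ===== VERDICT (by name: the statement is the Claim_ definition above) =====
theorem top_three_friends_of_friends_spec : Claim_equal_top_three_friends_of_friends := by
  intro user _ hpre
  unfold Pre_top_three_friends_of_friends at hpre
  unfold Spec_top_three_friends_of_friends
  simp only [top_three_friends_of_friends, top_three_friends_of_friends_alt]
  set D : PySem.Dict String (List String) := PySem.Dict.ofList user with hD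
  have hndD : D.keys.Nodup := by
    rw [hD, show PySem.Dict.ofList user = PySem.Dict.empty.update user from rfl]
    exact PySem.Dict.nodup_keys_update _ _ PySem.Dict.nodup_keys_empty
  set L0 : List String := D.items.flatMap Prod.snd with hL0
  rw [memoA_eq D hndD, countsB_eq D]
  set c : String → Int := fun k => ((L0.count k : Int)) with hc
  set K : List String := PySem.Set.ofList L0 with hK
  have hkeys : (PySem.Dict.counter L0).keys = K := PySem.Dict.keys_counter L0
  have hkey : (fun k => (PySem.Dict.counter L0).getD k 0) = c := by
    funext k; rw [PySem.Dict.getD_counter]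
  have hit0 : (PySem.Dict.counter L0).items = K.map (fun k => (k, c k)) :=
    PySem.Dict.items_counter L0
  have hndK : K.Nodup := PySem.Set.nodup_ofList L0
  have hpos : ∀ k ∈ K, 0 < c k := by
    intro k hk
    have : k ∈ L0 := (PySem.Set.mem_ofList L0 k).1 hk
    simp only [hc]
    exact_mod_cast List.count_pos_iff.2 this
  have hlen : 3 ≤ K.length := hpre
  -- three rounds of the stable descending sort
  obtain ⟨as0, m0, bs0, hK0, has0, hall0, hs0⟩ :=
    sorted_rev_head_decomp c K (List.ne_nil_of_length_pos (by omega))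
  have hlenK : K.length = as0.length + 1 + bs0.length := by rw [hK0]; simp; omega
  obtain ⟨as1, m1, bs1, hX1d, has1, hall1, hs1⟩ :=
    sorted_rev_head_decomp c (as0 ++ bs0)
      (List.ne_nil_of_length_pos (by simp [List.length_append]; omega))
  have hlenX1 : as0.length + bs0.length = as1.length + 1 + bs1.length := by
    have h := congrArg List.length hX1d
    simp [List.length_append] at h; omega
  obtain ⟨as2, m2, bs2, hX2d, has2, hall2, hs2⟩ :=
    sorted_rev_head_decomp c (as1 ++ bs1)
      (List.ne_nil_of_length_pos (by simp [List.length_append]; omega))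
  -- nodup bookkeeping
  have hnd0 : (as0 ++ m0 :: bs0).Nodup := hK0 ▸ hndK
  have hm0X1 : m0 ∉ as0 ++ bs0 := by
    have := (List.nodup_middle.1 hnd0)
    exact (List.nodup_cons.1 this).1
  have hndX1 : (as0 ++ bs0).Nodup := (List.nodup_cons.1 (List.nodup_middle.1 hnd0)).2
  have hnd1 : (as1 ++ m1 :: bs1).Nodup := hX1d ▸ hndX1
  have hm1X2 : m1 ∉ as1 ++ bs1 := (List.nodup_cons.1 (List.nodup_middle.1 hnd1)).1
  have hsub1 : ∀ x ∈ as0 ++ bs0, x ∈ K := by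
    intro x hx; rw [hK0]
    rcases List.mem_append.1 hx with h | h
    · exact List.mem_append.2 (Or.inl h)
    · exact List.mem_append.2 (Or.inr (List.mem_cons_of_mem _ h))
  have hsub2 : ∀ x ∈ as1 ++ bs1, x ∈ as0 ++ bs0 := by
    intro x hx; rw [hX1d]
    rcases List.mem_append.1 hx with h | h
    · exact List.mem_append.2 (Or.inl h)
    · exact List.mem_append.2 (Or.inr (List.mem_cons_of_mem _ h))
  have hm0K : m0 ∈ K := by rw [hK0]; simp
  have hm1X1 : m1 ∈ as0 ++ bs0 := by rw [hX1d]; simp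
  have hm2X2 : m2 ∈ as1 ++ bs1 := by rw [hX2d]; simp
  have hm1m0 : m1 ≠ m0 := fun h => hm0X1 (h ▸ hm1X1)
  have hm2m1 : m2 ≠ m1 := fun h => hm1X2 (h ▸ hm2X2)
  have hm2m0 : m2 ≠ m0 := fun h => hm0X1 (h ▸ hsub2 _ hm2X2)
  -- round values
  set w1 : String → Int := fun k => if k = m0 then -1 else c k with hw1
  set w2 : String → Int := fun k => if k = m1 then -1 else w1 k with hw2
  -- round 1
  have hflt0 : K.filter (fun k => decide (0 < c k)) = as0 ++ m0 :: bs0 := by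
    rw [List.filter_eq_self.2 (fun k hk => by simpa using hpos k hk)]; exact hK0
  have hpick0 : pvPickMax (PySem.Dict.counter L0) = (some m0, c m0) := by
    unfold pvPickMax
    rw [hit0]
    exact round_select K c as0 bs0 m0 hflt0 (hpos m0 hm0K) has0
      (fun y hy => hall0 y (by rw [hK0]; exact List.mem_append.2 (Or.inr (List.mem_cons_of_mem _ hy))))
  -- round 2
  have hcont0 : (PySem.Dict.counter L0).contains m0 = true :=
    (PySem.Dict.contains_iff_mem_keys _ _).2 (hkeys ▸ hm0K)
  have hit1 : ((PySem.Dict.counter L0).insert m0 (-1)).items = K.map (fun k => (k, w1 k)) := by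
    rw [PySem.Dict.items_insert_of_contains _ _ hcont0, hit0, List.map_map]
    apply List.map_congr_left
    intro k _
    by_cases hkm : k = m0 <;> simp [hkm, hw1]
  have hflt1 : K.filter (fun k => decide (0 < w1 k)) = as1 ++ m1 :: bs1 := by
    rw [hK0, List.filter_append, List.filter_cons]
    have hm0f : (decide (0 < w1 m0)) = false := by simp [hw1]
    rw [hm0f]
    simp only [Bool.false_eq_true, if_neg (by simp : ¬False)]
    rw [List.filter_eq_self.2 (fun k hk => by
        have hkK : k ∈ K := hsub1 k (List.mem_append.2 (Or.inl hk))
        have hkm0 : k ≠ m0 := fun h => hm0X1 (h ▸ List.mem_append.2 (Or.inl hk))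
        simp [hw1, hkm0, hpos k hkK]),
      List.filter_eq_self.2 (fun k hk => by
        have hkK : k ∈ K := hsub1 k (List.mem_append.2 (Or.inr hk))
        have hkm0 : k ≠ m0 := fun h => hm0X1 (h ▸ List.mem_append.2 (Or.inr hk))
        simp [hw1, hkm0, hpos k hkK])]
    exact hX1d
  have hw1m1 : w1 m1 = c m1 := by simp [hw1, hm1m0]
  have hpick1 : pvPickMax ((PySem.Dict.counter L0).insert m0 (-1)) = (some m1, c m1) := by
    unfold pvPickMax
    rw [hit1, ← hw1m1]
    refine round_select K w1 as1 bs1 m1 hflt1 (by rw [hw1m1]; exact hpos m1 (hsub1 _ hm1X1)) ?_ ?_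
    · intro a ha
      have haX1 : a ∈ as0 ++ bs0 := hsub2 a (List.mem_append.2 (Or.inl ha))
      have ham0 : a ≠ m0 := fun h => hm0X1 (h ▸ haX1)
      rw [hw1m1]; simp only [hw1, if_neg ham0]
      exact has1 a ha
    · intro y hy
      have hyX1 : y ∈ as0 ++ bs0 := hsub2 y (List.mem_append.2 (Or.inr hy))
      have hym0 : y ≠ m0 := fun h => hm0X1 (h ▸ hyX1)
      rw [hw1m1]; simp only [hw1, if_neg hym0]
      exact hall1 y hyX1
  -- round 3
  have hcont1 : (((PySem.Dict.counter L0).insert m0 (-1))).contains m1 = true := by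
    rw [PySem.Dict.contains_insert]
    have : (PySem.Dict.counter L0).contains m1 = true :=
      (PySem.Dict.contains_iff_mem_keys _ _).2 (hkeys ▸ hsub1 _ hm1X1)
    simp [this]
  have hit2 : (((PySem.Dict.counter L0).insert m0 (-1)).insert m1 (-1)).items
      = K.map (fun k => (k, w2 k)) := by
    rw [PySem.Dict.items_insert_of_contains _ _ hcont1, hit1, List.map_map]
    apply List.map_congr_left
    intro k _
    by_cases hkm : k = m1 <;> simp [hkm, hw2]
  have hsub3 : ∀ x ∈ as2 ++ bs2, x ∈ as1 ++ bs1 := by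
    intro x hx; rw [hX2d]
    rcases List.mem_append.1 hx with h | h
    · exact List.mem_append.2 (Or.inl h)
    · exact List.mem_append.2 (Or.inr (List.mem_cons_of_mem _ h))
  have hw2c : ∀ k, k ∈ as0 ++ bs0 → k ≠ m1 → w2 k = c k := by
    intro k hk hk1
    have hk0 : k ≠ m0 := fun h => hm0X1 (h ▸ hk)
    simp [hw2, hw1, hk1, hk0]
  have hflt2 : K.filter (fun k => decide (0 < w2 k)) = as2 ++ m2 :: bs2 := by
    rw [hK0, List.filter_append, List.filter_cons]
    have hm0f : (decide (0 < w2 m0)) = false := by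
      by_cases h : m0 = m1 <;> simp [hw2, hw1, h]
    rw [hm0f]
    simp only [Bool.false_eq_true, if_neg (by simp : ¬False)]
    rw [← List.filter_append, hX1d, List.filter_append, List.filter_cons]
    have hm1f : (decide (0 < w2 m1)) = false := by simp [hw2]
    rw [hm1f]
    simp only [Bool.false_eq_true, if_neg (by simp : ¬False)]
    rw [List.filter_eq_self.2 (fun k hk => by
        have hkX1 : k ∈ as0 ++ bs0 := hsub2 k (List.mem_append.2 (Or.inl hk))
        have hk1 : k ≠ m1 := fun h => hm1X2 (h ▸ List.mem_append.2 (Or.inl hk))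
        rw [hw2c k hkX1 hk1]
        simp [hpos k (hsub1 k hkX1)]),
      List.filter_eq_self.2 (fun k hk => by
        have hkX1 : k ∈ as0 ++ bs0 := hsub2 k (List.mem_append.2 (Or.inr hk))
        have hk1 : k ≠ m1 := fun h => hm1X2 (h ▸ List.mem_append.2 (Or.inr hk))
        rw [hw2c k hkX1 hk1]
        simp [hpos k (hsub1 k hkX1)])]
    exact hX2d
  have hw2m2 : w2 m2 = c m2 := hw2c m2 (hsub2 _ hm2X2) hm2m1
  have hpick2 : pvPickMax (((PySem.Dict.counter L0).insert m0 (-1)).insert m1 (-1))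
      = (some m2, c m2) := by
    unfold pvPickMax
    rw [hit2, ← hw2m2]
    refine round_select K w2 as2 bs2 m2 hflt2
      (by rw [hw2m2]; exact hpos m2 (hsub1 _ (hsub2 _ hm2X2))) ?_ ?_
    · intro a ha
      have haX2 : a ∈ as1 ++ bs1 := hsub3 a (List.mem_append.2 (Or.inl ha))
      have ha1 : a ≠ m1 := fun h => hm1X2 (h ▸ haX2)
      rw [hw2m2, hw2c a (hsub2 _ haX2) ha1]
      exact has2 a ha
    · intro y hy
      have hyX2 : y ∈ as1 ++ bs1 := hsub3 y (List.mem_append.2 (Or.inr hy))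
      have hy1 : y ≠ m1 := fun h => hm1X2 (h ▸ hyX2)
      rw [hw2m2, hw2c y (hsub2 _ hyX2) hy1]
      exact hall2 y hyX2
  -- evaluate A's three rounds and B's sorted prefix
  have hR : PySem.List.pyRange 0 3 1 = [0, 1, 2] := by decide
  rw [hR]
  simp only [List.foldl_cons, List.foldl_nil]
  rw [pvRoundStep_eval _ _ _ _ _ hpick0, pvRoundStep_eval _ _ _ _ _ hpick1,
    pvRoundStep_eval _ _ _ _ _ hpick2]
  rw [hkeys, hkey, hs0, hs1, hs2]
  rw [show (3 : Int) = ((3 : Nat) : Int) by norm_num, PySem.List.slice_to_natCast]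
  simp
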